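-- pv_equiv track=rewrite | github.com/mehta-lab/waveorder | waveorder/io/utils.py | _add_yaml_comments
-- ===== SOURCE A (Python) =====
-- def _add_yaml_comments(yaml_str, descriptions, comment_column=44):
--     """Add inline comments to YAML lines from a {dotted.path: description} map."""
--     lines = yaml_str.splitlines()
--     result = []
--     path_stack = []  # [(indent_level, key)]
--
--     for line in lines:
--         stripped = line.lstrip()
--         if not stripped or stripped.startswith("#") or stripped.startswith("- "):
--             result.append(line)
--             continue
--
--         indent = len(line) - len(stripped)
--
--         if ":" in stripped:
--             key = stripped.split(":")[0].strip()
--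
--             # Pop entries at same or deeper indent
--             while path_stack and path_stack[-1][0] >= indent:
--                 path_stack.pop()
--
--             path_stack.append((indent, key))
--             field_path = ".".join(item[1] for item in path_stack)
--
--             desc = descriptions.get(field_path)
--             if desc:
--                 padding = max(1, comment_column - len(line))
--                 line = line + " " * padding + "# " + desc
--
--         result.append(line)
--
--     return "\n".join(result) + "\n"
-- ===== SOURCE B (Python) =====
-- def _add_yaml_comments(yaml_str, descriptions, comment_column=44):
--     """Add inline comments to YAML lines from a {dotted.path: description} map.
--
--     Two staged passes with no cross-line state: first parse every line into
--     (indent, key) or None, then annotate each line independently, recovering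
--     its dotted path by scanning backwards for the nearest shallower key lines.
--     """
--     lines = yaml_str.splitlines()
--
--     def parse(line):
--         stripped = line.lstrip()
--         if (not stripped or stripped.startswith("#")
--                 or stripped.startswith("- ") or ":" not in stripped):
--             return None
--         return len(line) - len(stripped), stripped.split(":")[0].strip()
--
--     parsed = [parse(line) for line in lines]
--
--     def annotate(j, line):
--         if parsed[j] is None:
--             return line
--         bound, parts = parsed[j][0], [parsed[j][1]]
--         for item in reversed(parsed[:j]):
--             if item is not None and item[0] < bound:
--                 parts.append(item[1])
--                 bound = item[0]
--         desc = descriptions.get(".".join(reversed(parts)))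
--         if desc:
--             return line + " " * max(1, comment_column - len(line)) + "# " + desc
--         return line
--
--     return "\n".join(annotate(j, line) for j, line in enumerate(lines)) + "\n"
-- ===== Notes on version B (the rewrite author's own statement) =====
-- stated objective: alternative
-- what changed: A is a stateful single pass keeping a mutable ancestor stack across lines; B is two staged passes with no cross-line state: parse every line to (indent, key) or None, then annotate each line independently, recovering its dotted path by a backward scan for the nearest shallower key lines.
import Mathlib
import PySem

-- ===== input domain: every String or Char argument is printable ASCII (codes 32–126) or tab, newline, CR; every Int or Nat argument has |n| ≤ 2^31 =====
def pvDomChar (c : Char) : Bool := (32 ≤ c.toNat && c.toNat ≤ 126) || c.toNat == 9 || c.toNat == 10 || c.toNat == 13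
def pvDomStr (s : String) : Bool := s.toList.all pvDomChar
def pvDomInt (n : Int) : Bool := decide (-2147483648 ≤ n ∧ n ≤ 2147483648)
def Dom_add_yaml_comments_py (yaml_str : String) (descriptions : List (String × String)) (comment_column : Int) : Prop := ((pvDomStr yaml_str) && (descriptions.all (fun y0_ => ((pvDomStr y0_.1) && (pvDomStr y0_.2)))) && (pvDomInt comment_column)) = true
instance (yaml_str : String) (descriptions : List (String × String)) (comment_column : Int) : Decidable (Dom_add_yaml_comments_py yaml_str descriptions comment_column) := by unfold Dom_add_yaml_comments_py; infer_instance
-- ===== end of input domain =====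

-- B replaces A's stateful single pass (a mutable ancestor stack) by two staged passes:
-- parse every line, then annotate each line independently, recovering its dotted path by a
-- backward scan for the nearest shallower key lines (objective: alternative, no speed claim).

-- ===== PORT A =====

-- the `while path_stack and path_stack[-1][0] >= indent: path_stack.pop()` loop,
-- popping from the END of the stack, as the obvious structural recursion
def pyPopStack (indent : Int) : List (Int × String) → List (Int × String)
  | [] => []
  | e :: rest =>
    match pyPopStack indent rest with
    | [] => if indent ≤ e.1 then [] else [e]
    | r => e :: r

-- descriptions.get(field_path) (descriptions is a Python dict)
def pyDescGet (descriptions : List (String × String)) (k : String) : Option String :=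
  (PySem.Dict.mk descriptions).get? k

-- stripped.split(":")[0].strip(); split on the nonempty ":" is never none/empty, so the defaults are unreachable
def pyLineKey (stripped : String) : String :=
  PySem.Str.strip (((PySem.Str.split? stripped ":").getD []).headD "")

-- `if desc: line = line + " " * max(1, comment_column - len(line)) + "# " + desc` (None and "" falsy)
def pyCommented (line : String) (desc : Option String) (comment_column : Int) : String :=
  match desc with
  | none => line
  | some d =>
    if d = "" then line
    else line ++ String.ofList (List.replicate (max 1 (comment_column - PySem.Str.len line)).toNat ' ') ++ "# " ++ d

-- one iteration of A's `for line in lines` loop over state (path_stack, result)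
def aStep (descriptions : List (String × String)) (comment_column : Int)
    (st : List (Int × String) × List String) (line : String) :
    List (Int × String) × List String :=
  if PySem.Str.lstrip line = "" || PySem.Str.startswith (PySem.Str.lstrip line) "#" || PySem.Str.startswith (PySem.Str.lstrip line) "- " then
    (st.1, st.2 ++ [line])
  else
    if PySem.Str.isIn ":" (PySem.Str.lstrip line) then
      (pyPopStack (PySem.Str.len line - PySem.Str.len (PySem.Str.lstrip line)) st.1
          ++ [(PySem.Str.len line - PySem.Str.len (PySem.Str.lstrip line), pyLineKey (PySem.Str.lstrip line))],
        st.2 ++ [pyCommented line (pyDescGet descriptions (PySem.Str.join "."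
          ((pyPopStack (PySem.Str.len line - PySem.Str.len (PySem.Str.lstrip line)) st.1
            ++ [(PySem.Str.len line - PySem.Str.len (PySem.Str.lstrip line), pyLineKey (PySem.Str.lstrip line))]).map (·.2)))) comment_column])
    else
      (st.1, st.2 ++ [line])

def add_yaml_comments_py (yaml_str : String) (descriptions : List (String × String)) (comment_column : Int) : String :=
  PySem.Str.join "\n" ((PySem.Str.splitlines yaml_str).foldl (aStep descriptions comment_column) ([], [])).2 ++ "\n"

-- ===== PORT B =====

-- B's parse(line): (indent, key) for a commentable key line, None otherwise
-- (the Python `if A or B or C or D: return None` written as its short-circuit expansion)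
def pyParse (line : String) : Option (Int × String) :=
  if PySem.Str.lstrip line = "" || PySem.Str.startswith (PySem.Str.lstrip line) "#"
      || PySem.Str.startswith (PySem.Str.lstrip line) "- " then none
  else if PySem.Str.isIn ":" (PySem.Str.lstrip line) then
    some (PySem.Str.len line - PySem.Str.len (PySem.Str.lstrip line), pyLineKey (PySem.Str.lstrip line))
  else none

-- one iteration of B's `for item in reversed(parsed[:j])` loop over state (parts, bound)
def bScanStep (s : List String × Int) (item : Option (Int × String)) : List String × Int :=
  match item with
  | some e => if e.1 < s.2 then (s.1 ++ [e.2], e.1) else s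
  | none => s

-- B's annotate(j, line); parsed[j] with j from enumerate is always in range, so getD's default is unreachable
def pyAnnotate (descriptions : List (String × String)) (comment_column : Int)
    (parsed : List (Option (Int × String))) (j : Int) (line : String) : String :=
  match PySem.List.pyGetD parsed j none with
  | none => line
  | some ik =>
    let parts := ((PySem.List.slice parsed none (some j)).reverse.foldl bScanStep ([ik.2], ik.1)).1
    pyCommented line (pyDescGet descriptions (PySem.Str.join "." parts.reverse)) comment_column

def add_yaml_comments_py_alt (yaml_str : String) (descriptions : List (String × String)) (comment_column : Int) : String :=
  PySem.Str.join "\n"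
    ((PySem.List.enumerate (PySem.Str.splitlines yaml_str)).map
      (fun p => pyAnnotate descriptions comment_column
        ((PySem.Str.splitlines yaml_str).map pyParse) p.1 p.2))
  ++ "\n"

-- ===== PRECONDITION & SPEC =====
def Spec_add_yaml_comments_py (yaml_str : String) (descriptions : List (String × String)) (comment_column : Int) (out : String) : Prop := out = add_yaml_comments_py_alt yaml_str descriptions comment_column
instance (yaml_str : String) (descriptions : List (String × String)) (comment_column : Int) (out : String) : Decidable (Spec_add_yaml_comments_py yaml_str descriptions comment_column out) := by unfold Spec_add_yaml_comments_py; infer_instance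

-- ===== CLAIM (what is proved, stated in full; the proofs are below) =====
def Claim_equal_add_yaml_comments_py : Prop := ∀ (yaml_str : String) (descriptions : List (String × String)) (comment_column : Int), Dom_add_yaml_comments_py yaml_str descriptions comment_column → Spec_add_yaml_comments_py yaml_str descriptions comment_column (add_yaml_comments_py yaml_str descriptions comment_column)

-- ===== LEMMAS AND PROOFS =====

-- A's stack after the key lines seen so far (one aStep stack update per key event)
def stackOf (es : List (Int × String)) : List (Int × String) :=
  es.foldl (fun st e => pyPopStack e.1 st ++ [e]) []

-- the root-first ancestor chain B's backward scan discovers, on the reversed key events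
def ancEv : Int → List (Int × String) → List (Int × String)
  | _, [] => []
  | d, e :: rev => if e.1 < d then ancEv e.1 rev ++ [e] else ancEv d rev

-- A's while-pop-from-end on a strictly indent-increasing stack is a filter
theorem stackOf_append_singleton (es : List (Int × String)) (e : Int × String) :
    stackOf (es ++ [e]) = pyPopStack e.1 (stackOf es) ++ [e] := by
  unfold stackOf
  rw [List.foldl_append]
  rfl

theorem pyPopStack_eq_filter (ind : Int) :
    ∀ (s : List (Int × String)), s.Pairwise (fun a b => a.1 < b.1) →
      pyPopStack ind s = s.filter (fun p => decide (p.1 < ind)) := by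
  intro s hs
  induction s with
  | nil => rfl
  | cons e rest ih =>
    rcases List.pairwise_cons.mp hs with ⟨he, hrest⟩
    have ihr := ih hrest
    by_cases hfil : rest.filter (fun p => decide (p.1 < ind)) = []
    · simp only [pyPopStack, ihr, hfil, List.filter_cons]
      by_cases h : ind ≤ e.1
      · have : ¬ e.1 < ind := not_lt.mpr h
        simp [h, this]
      · have : e.1 < ind := lt_of_not_ge h
        simp [h, this]
    · have hlt : e.1 < ind := by
        rcases List.ne_nil_iff_exists_cons.mp hfil with ⟨x, xs, hx⟩
        have hxmem : x ∈ rest.filter (fun p => decide (p.1 < ind)) := by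
          rw [hx]; exact List.mem_cons_self
        have hxlt : x.1 < ind := by simpa using (List.of_mem_filter hxmem)
        exact lt_trans (he x (List.mem_of_mem_filter hxmem)) hxlt
      simp only [pyPopStack, ihr, List.filter_cons]
      rcases List.ne_nil_iff_exists_cons.mp hfil with ⟨x, xs, hx⟩
      simp [hx, hlt]

-- one stack update preserves strict indent increase
theorem stackUpdate_pairwise (s : List (Int × String)) (d : Int) (k : String)
    (hpw : s.Pairwise (fun a b => a.1 < b.1)) :
    (pyPopStack d s ++ [(d, k)]).Pairwise (fun a b => a.1 < b.1) := by
  rw [pyPopStack_eq_filter d s hpw, List.pairwise_append]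
  refine ⟨List.Pairwise.filter _ hpw, List.pairwise_singleton _ _, ?_⟩
  intro a ha b hb
  simp only [List.mem_singleton] at hb
  rw [hb]
  simpa using List.of_mem_filter ha

theorem stackOf_pairwise : ∀ es : List (Int × String),
    (stackOf es).Pairwise (fun a b => a.1 < b.1) := by
  intro es
  induction es using List.reverseRecOn with
  | nil => exact List.Pairwise.nil
  | append_singleton es e ih =>
    rw [stackOf_append_singleton]
    exact stackUpdate_pairwise _ _ _ ih

-- the backward ancestor scan of the reversed events equals the filtered stack
theorem ancEv_eq_filter_stackOf : ∀ (es : List (Int × String)) (d : Int),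
    ancEv d es.reverse = (stackOf es).filter (fun p => decide (p.1 < d)) := by
  intro es
  induction es using List.reverseRecOn with
  | nil => intro d; rfl
  | append_singleton es e ih =>
    intro d
    have hst : stackOf (es ++ [e]) = (stackOf es).filter (fun p => decide (p.1 < e.1)) ++ [e] := by
      rw [stackOf_append_singleton, pyPopStack_eq_filter e.1 _ (stackOf_pairwise es)]
    rw [List.reverse_append, List.reverse_singleton, List.singleton_append, hst]
    show (if e.1 < d then ancEv e.1 es.reverse ++ [e] else ancEv d es.reverse) = _
    rw [List.filter_append]
    by_cases hed : e.1 < d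
    · have h1 : ((stackOf es).filter (fun p => decide (p.1 < e.1))).filter
          (fun p => decide (p.1 < d)) = (stackOf es).filter (fun p => decide (p.1 < e.1)) := by
        apply List.filter_eq_self.mpr
        intro p hp
        have := List.of_mem_filter hp
        simp only [decide_eq_true_eq] at this ⊢
        exact lt_trans this hed
      simp [hed, h1, ih e.1]
    · have h1 : ((stackOf es).filter (fun p => decide (p.1 < e.1))).filter
          (fun p => decide (p.1 < d)) = (stackOf es).filter (fun p => decide (p.1 < d)) := by
        rw [List.filter_filter]
        apply List.filter_congr
        intro p _
        by_cases hpd : p.1 < d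
        · have : p.1 < e.1 := lt_of_lt_of_le hpd (not_lt.mp hed)
          simp [hpd, this]
        · simp [hpd]
      simp [hed, h1, ih d]

-- B's scan skips the None entries
theorem bScan_skip_none : ∀ (rev : List (Option (Int × String))) (s : List String × Int),
    rev.foldl bScanStep s = (rev.filterMap id).foldl (fun s e => bScanStep s (some e)) s := by
  intro rev
  induction rev with
  | nil => intro s; rfl
  | cons o rest ih =>
    intro s
    cases o with
    | none => simpa [bScanStep] using ih s
    | some e => simp [ih]

-- B's scan accumulates exactly the ancestor-chain keys, leaf first
theorem bScan_parts : ∀ (rev : List (Int × String)) (parts : List String) (d : Int),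
    (rev.foldl (fun s e => bScanStep s (some e)) (parts, d)).1
      = parts ++ ((ancEv d rev).map (·.2)).reverse := by
  intro rev
  induction rev with
  | nil => intro parts d; simp [ancEv]
  | cons e rest ih =>
    intro parts d
    show ((rest.foldl _ (bScanStep (parts, d) (some e)))).1 = _
    by_cases hed : e.1 < d
    · have : bScanStep (parts, d) (some e) = (parts ++ [e.2], e.1) := by
        simp [bScanStep, hed]
      rw [this, ih]
      simp [ancEv, hed]
    · have : bScanStep (parts, d) (some e) = (parts, d) := by
        simp [bScanStep, hed]
      rw [this, ih]
      simp [ancEv, hed]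

-- one aStep, phrased through B's parse of the line
theorem aStep_eq_parse (descriptions : List (String × String)) (cc : Int)
    (s : List (Int × String)) (res : List String) (line : String) :
    aStep descriptions cc (s, res) line =
      match pyParse line with
      | none => (s, res ++ [line])
      | some ik =>
        (pyPopStack ik.1 s ++ [ik],
         res ++ [pyCommented line (pyDescGet descriptions (PySem.Str.join "."
           ((pyPopStack ik.1 s ++ [ik]).map (·.2)))) cc]) := by
  unfold aStep pyParse
  cases h1 : (PySem.Str.lstrip line = "" || PySem.Str.startswith (PySem.Str.lstrip line) "#"
      || PySem.Str.startswith (PySem.Str.lstrip line) "- ") <;>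
    cases h2 : PySem.Str.isIn ":" (PySem.Str.lstrip line) <;>
      simp

-- the joint induction: A's fold over the remaining lines, started on the stack of the
-- key events of the processed prefix, produces B's independently annotated lines
theorem fold_eq_map (descriptions : List (String × String)) (cc : Int) :
    ∀ (suf pre : List String) (res : List String),
      (suf.foldl (aStep descriptions cc) (stackOf (pre.filterMap pyParse), res)).2
        = res ++ (PySem.List.enumerate suf (pre.length : Int)).map
            (fun p => pyAnnotate descriptions cc ((pre ++ suf).map pyParse) p.1 p.2) := by
  intro suf
  induction suf with
  | nil => intro pre res; simp [PySem.List.enumerate_nil]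
  | cons line rest ih =>
    intro pre res
    have hget : PySem.List.pyGetD ((pre ++ line :: rest).map pyParse) (pre.length : Int) none
        = pyParse line := by
      rw [List.map_append]
      have hlen : (pre.length : Int) = ((pre.map pyParse).length : Int) := by simp
      rw [hlen, PySem.List.pyGetD_natCast]
      simp [List.getD]
    have hslice : PySem.List.slice ((pre ++ line :: rest).map pyParse) none (some (pre.length : Int))
        = pre.map pyParse := by
      rw [PySem.List.slice_to_natCast]
      simp [List.map_append]
    have hannot : ∀ (j : Int) (l : String), j = (pre.length : Int) →
        pyAnnotate descriptions cc ((pre ++ line :: rest).map pyParse) j l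
          = match pyParse line with
            | none => l
            | some ik => pyCommented l (pyDescGet descriptions (PySem.Str.join "."
                ((pyPopStack ik.1 (stackOf (pre.filterMap pyParse)) ++ [ik]).map (·.2)))) cc := by
      intro j l hj
      subst hj
      unfold pyAnnotate
      rw [hget, hslice]
      cases hp : pyParse line with
      | none => rfl
      | some ik =>
        dsimp only
        have hrev : (pre.map pyParse).reverse.filterMap id = (pre.filterMap pyParse).reverse := by
          rw [List.filterMap_reverse, List.filterMap_map]
          rfl
        rw [bScan_skip_none, hrev, bScan_parts, ancEv_eq_filter_stackOf,
          ← pyPopStack_eq_filter ik.1 _ (stackOf_pairwise _)]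
        simp
    rw [List.foldl_cons, aStep_eq_parse]
    cases hp : pyParse line with
    | none =>
      dsimp only
      have hstack : stackOf (pre.filterMap pyParse)
          = stackOf ((pre ++ [line]).filterMap pyParse) := by
        simp [List.filterMap_append, hp]
      have h := ih (pre ++ [line]) (res ++ [line])
      simp only [List.append_assoc, List.singleton_append, List.length_append,
        List.length_singleton] at h
      push_cast at h
      rw [hstack, h, PySem.List.enumerate_cons, List.map_cons, hannot _ line rfl, hp]
    | some ik =>
      dsimp only
      have hstack : pyPopStack ik.1 (stackOf (pre.filterMap pyParse)) ++ [ik]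
          = stackOf ((pre ++ [line]).filterMap pyParse) := by
        simp only [List.filterMap_append, List.filterMap_cons, hp, List.filterMap_nil]
        rw [stackOf_append_singleton]
      have h := ih (pre ++ [line])
        (res ++ [pyCommented line (pyDescGet descriptions (PySem.Str.join "."
          ((pyPopStack ik.1 (stackOf (pre.filterMap pyParse)) ++ [ik]).map (·.2)))) cc])
      simp only [List.append_assoc, List.singleton_append, List.length_append,
        List.length_singleton] at h
      push_cast at h
      rw [hstack] at h ⊢
      rw [h, PySem.List.enumerate_cons, List.map_cons, hannot _ line rfl, hp]
      dsimp only
      rw [hstack]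

-- ===== VERDICT (by name: the statement is the Claim_ definition above) =====
theorem add_yaml_comments_py_spec : Claim_equal_add_yaml_comments_py := by
  intro yaml_str descriptions comment_column _
  unfold Spec_add_yaml_comments_py add_yaml_comments_py add_yaml_comments_py_alt
  have h := fold_eq_map descriptions comment_column (PySem.Str.splitlines yaml_str) [] []
  simp only [List.filterMap_nil, List.length_nil, Nat.cast_zero, List.nil_append] at h
  rw [show stackOf [] = [] from rfl] at h
  rw [h]
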